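-- pv_equiv track=rewrite | github.com/mrparkonline/python3-euler | q14.py | collatzSet
-- ===== SOURCE A (Python) =====
-- def collatzSet(upperLimit):
--     """ The following function creates dataSet of collatz sequence under the upperLimit
--     --param:
--     upperLimit : int
--     --return:
--     dictionary
--     """
--
--     def collatz(n):
--         """ Find the next collatz value dependant on n
--         --param:
--         n : int
--         --return:
--         int : the collatz value
--         """
--         if n % 2 == 0:
--             return n // 2
--         else:
--             return 3*n + 1
--     # end of collatz
--
--     data = {} # Initialization
--     data[1] = [1] # Base
--
--     def collatzSequence(start):
--         """ Creates the collatz sequence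
--         --param:
--         start : int
--         --return
--         list : collatz sequence
--         """
--         nextValue = collatz(start)
--         if nextValue in data.keys():
--             return [start] + data[nextValue]
--         else:
--             return [start] + collatzSequence(nextValue)
--
--     for i in range(2,upperLimit):
--         if i not in data.keys():
--             data[i] = collatzSequence(i)
--
--     return data
-- ===== SOURCE B (Python) =====
-- def collatzSet(upperLimit):
--     data = {1: [1]}
--     for i in range(2, upperLimit):
--         # collect the chain iteratively until it drops below i, then one concat
--         prefix = []
--         v = i
--         while v >= i:
--             prefix.append(v)
--             v = v // 2 if v % 2 == 0 else 3 * v + 1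
--         data[i] = prefix + data[v]
--     return data
-- ===== Notes on version B (the rewrite author's own statement) =====
-- stated objective: simpler
-- what changed: Replaces A's recursive helper that tests dict membership at every chain step and concatenates once per recursion level with a flat loop that collects each chain iteratively, stops by the arithmetic condition v < i, and does a single concatenation with the stored tail per entry.
import Mathlib
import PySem

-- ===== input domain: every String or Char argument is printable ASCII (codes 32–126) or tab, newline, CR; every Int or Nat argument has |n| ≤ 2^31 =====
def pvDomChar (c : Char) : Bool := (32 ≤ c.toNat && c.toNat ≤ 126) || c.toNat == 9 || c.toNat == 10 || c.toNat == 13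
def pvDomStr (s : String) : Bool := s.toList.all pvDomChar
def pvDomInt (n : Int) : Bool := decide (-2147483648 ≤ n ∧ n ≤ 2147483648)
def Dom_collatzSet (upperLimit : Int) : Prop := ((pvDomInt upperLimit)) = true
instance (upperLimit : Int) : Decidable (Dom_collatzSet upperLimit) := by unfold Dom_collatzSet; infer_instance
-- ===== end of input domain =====

-- B replaces A's recursive dict-membership memo lookup per step by an iterative
-- chain collection with an arithmetic stop condition and a single concatenation
-- per entry (objective: simpler).
-- Both ports model the unbounded chain walk (Python: recursion in A, a while
-- loop in B) with the same fuel bound pvFuel; the walk terminates far within it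
-- on every input where the Pythons return.

-- ===== PORT A =====
-- inner helper collatz(n)
def pvCollatzA (n : Int) : Int :=
  if PySem.Int.mod n 2 = 0 then PySem.Int.floordiv n 2 else 3 * n + 1

-- inner helper collatzSequence(start); fuel models the unbounded recursion
def pvSeqA (data : PySem.Dict Int (List Int)) : Nat → Int → List Int
  | 0, _ => []
  | fuel + 1, start =>
    let nextValue := pvCollatzA start
    match PySem.Dict.get? data nextValue with
    | some tail => start :: tail
    | none => start :: pvSeqA data fuel nextValue

def pvFuel : Nat := 100000

def collatzSet (upperLimit : Int) : List (Int × List Int) :=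
  let data : PySem.Dict Int (List Int) := PySem.Dict.insert PySem.Dict.empty 1 [1]
  ((PySem.List.pyRange 2 upperLimit 1).foldl
    (fun data i =>
      if (PySem.Dict.contains data i) then data
      else PySem.Dict.insert data i (pvSeqA data pvFuel i))
    data).items

-- ===== PORT B =====
-- the step  v = v // 2 if v % 2 == 0 else 3*v + 1
def pvStepB (v : Int) : Int :=
  if PySem.Int.mod v 2 = 0 then PySem.Int.floordiv v 2 else 3 * v + 1

-- the while loop:  collect v's while v >= i, return (prefix, final v); fueled
def pvWalkB (i : Int) : Nat → Int → List Int × Int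
  | 0, v => ([], v)
  | fuel + 1, v =>
    if i ≤ v then
      let pr := pvWalkB i fuel (pvStepB v)
      (v :: pr.1, pr.2)
    else ([], v)

def collatzSet_alt (upperLimit : Int) : List (Int × List Int) :=
  ((PySem.List.pyRange 2 upperLimit 1).foldl
    (fun data i =>
      let pr := pvWalkB i pvFuel i
      PySem.Dict.insert data i (pr.1 ++ PySem.Dict.getD data pr.2 []))
    (PySem.Dict.insert PySem.Dict.empty 1 [1])).items

-- ===== PRECONDITION & SPEC =====
def Spec_collatzSet (upperLimit : Int) (out : List (Int × List Int)) : Prop := out = collatzSet_alt upperLimit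
instance (upperLimit : Int) (out : List (Int × List Int)) : Decidable (Spec_collatzSet upperLimit out) := by unfold Spec_collatzSet; infer_instance

-- ===== CLAIM (what is proved, stated in full; the proofs are below) =====
def Claim_equal_collatzSet : Prop := ∀ (upperLimit : Int), Dom_collatzSet upperLimit → Spec_collatzSet upperLimit (collatzSet upperLimit)

-- ===== LEMMAS AND PROOFS =====

-- the two step helpers are the same function
theorem pvStep_eq : pvCollatzA = pvStepB := rfl

-- the step keeps chain values positive
theorem pvStep_pos (v : Int) (hv : 2 ≤ v) : 1 ≤ pvStepB v := by
  unfold pvStepB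
  split_ifs with h
  · rw [PySem.Int.floordiv_eq_ediv_of_pos (by omega)]; omega
  · omega

-- key lemma: with the same fuel, A's recursive memo walk equals B's iterative
-- walk + one lookup, provided data's keys are exactly {1, …, i-1}.
theorem walk_eq (data : PySem.Dict Int (List Int)) (i : Int) (hi : 2 ≤ i)
    (hkeys : ∀ w, (PySem.Dict.get? data w).isSome = true ↔ 1 ≤ w ∧ w < i) :
    ∀ (fuel : Nat) (v : Int), i ≤ v →
      pvSeqA data fuel v =
        (pvWalkB i fuel v).1 ++ PySem.Dict.getD data (pvWalkB i fuel v).2 [] := by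
  intro fuel
  induction fuel with
  | zero =>
    intro v hv
    simp only [pvSeqA, pvWalkB, List.nil_append]
    have h : (PySem.Dict.get? data v).isSome = false := by
      by_contra hc
      have := (hkeys v).mp (by revert hc; cases PySem.Dict.get? data v <;> simp)
      omega
    rw [PySem.Dict.getD_eq_get?_getD]
    cases hg : PySem.Dict.get? data v with
    | none => rfl
    | some t => rw [hg] at h; simp at h
  | succ fuel ih =>
    intro v hv
    have hstep : pvWalkB i (fuel + 1) v =
        (v :: (pvWalkB i fuel (pvStepB v)).1, (pvWalkB i fuel (pvStepB v)).2) := by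
      simp only [pvWalkB, if_pos hv]
    rw [hstep]
    simp only [pvSeqA, pvStep_eq]
    cases hg : PySem.Dict.get? data (pvStepB v) with
    | some tail =>
      -- the next value is already stored: 1 ≤ nv < i, so B's walk stops at once
      have hlt : 1 ≤ pvStepB v ∧ pvStepB v < i := (hkeys _).mp (by rw [hg]; rfl)
      have hwB : pvWalkB i fuel (pvStepB v) = ([], pvStepB v) := by
        cases fuel with
        | zero => rfl
        | succ f =>
          simp only [pvWalkB]
          rw [if_neg (by omega)]
      rw [hwB]
      simp [PySem.Dict.getD_eq_get?_getD, hg]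
    | none =>
      -- not stored, hence (being positive) ≥ i: recurse
      have hpos : 1 ≤ pvStepB v := pvStep_pos v (by omega)
      have hge : i ≤ pvStepB v := by
        by_contra hc
        have : (PySem.Dict.get? data (pvStepB v)).isSome = true :=
          (hkeys _).mpr ⟨hpos, by omega⟩
        rw [hg] at this; simp at this
      rw [ih (pvStepB v) hge]
      simp

-- one outer step preserves "A's dict = B's dict, keys = {1, …, i-1}"
theorem step_eq (data : PySem.Dict Int (List Int)) (i : Int) (hi : 2 ≤ i)
    (hkeys : ∀ w, (PySem.Dict.get? data w).isSome = true ↔ 1 ≤ w ∧ w < i) :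
    (if (PySem.Dict.contains data i) then data
     else PySem.Dict.insert data i (pvSeqA data pvFuel i)) =
      PySem.Dict.insert data i ((pvWalkB i pvFuel i).1 ++
        PySem.Dict.getD data (pvWalkB i pvFuel i).2 []) := by
  have hnc : PySem.Dict.contains data i = false := by
    rw [PySem.Dict.contains_eq_isSome_get?]
    by_contra hc
    have := (hkeys i).mp (by revert hc; cases PySem.Dict.get? data i <;> simp)
    omega
  rw [hnc]
  simp only [Bool.false_eq_true, if_false]
  rw [walk_eq data i hi hkeys pvFuel i le_rfl]

-- key-set bookkeeping after an insert at i
theorem keys_step (data : PySem.Dict Int (List Int)) (i : Int) (hi : 2 ≤ i) (c : List Int)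
    (hkeys : ∀ w, (PySem.Dict.get? data w).isSome = true ↔ 1 ≤ w ∧ w < i) :
    ∀ w, (PySem.Dict.get? (PySem.Dict.insert data i c) w).isSome = true ↔ 1 ≤ w ∧ w < i + 1 := by
  intro w
  rw [PySem.Dict.get?_insert]
  split_ifs with h
  · simp; omega
  · rw [hkeys w]; omega

-- fold the range [2, …, 2+n) on both sides: equal dicts with keys {1, …, n+1}
theorem fold_eq (n : Nat) :
    (PySem.List.pyRange 2 (2 + (n : Int)) 1).foldl
        (fun data i =>
          if (PySem.Dict.contains data i) then data
          else PySem.Dict.insert data i (pvSeqA data pvFuel i))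
        (PySem.Dict.insert PySem.Dict.empty 1 [1]) =
      (PySem.List.pyRange 2 (2 + (n : Int)) 1).foldl
        (fun data i =>
          let pr := pvWalkB i pvFuel i
          PySem.Dict.insert data i (pr.1 ++ PySem.Dict.getD data pr.2 []))
        (PySem.Dict.insert PySem.Dict.empty 1 [1]) ∧
      (∀ w, (PySem.Dict.get?
          ((PySem.List.pyRange 2 (2 + (n : Int)) 1).foldl
            (fun data i =>
              if (PySem.Dict.contains data i) then data
              else PySem.Dict.insert data i (pvSeqA data pvFuel i))
            (PySem.Dict.insert PySem.Dict.empty 1 [1])) w).isSome = true ↔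
        1 ≤ w ∧ w < 2 + (n : Int)) := by
  induction n with
  | zero =>
    constructor
    · rw [PySem.List.pyRange_one_eq_nil (by omega)]
      rfl
    · intro w
      rw [PySem.List.pyRange_one_eq_nil (by omega)]
      simp only [List.foldl_nil]
      rw [PySem.Dict.get?_insert]
      split_ifs with h
      · simp; omega
      · simp [PySem.Dict.get?_empty]; omega
  | succ n ih =>
    obtain ⟨heq, hkeys⟩ := ih
    have hsplit : PySem.List.pyRange 2 (2 + ((n : Int) + 1)) 1 =
        PySem.List.pyRange 2 (2 + (n : Int)) 1 ++ [2 + (n : Int)] := by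
      have : (2 + ((n : Int) + 1)) = (2 + (n : Int)) + 1 := by ring
      rw [this, PySem.List.pyRange_one_succ_right (by omega)]
    push_cast
    push_cast at hsplit heq hkeys
    rw [hsplit]
    simp only [List.foldl_append, List.foldl_cons, List.foldl_nil]
    rw [← heq]
    set D := (PySem.List.pyRange 2 (2 + (n : Int)) 1).foldl
        (fun data i =>
          if (PySem.Dict.contains data i) then data
          else PySem.Dict.insert data i (pvSeqA data pvFuel i))
        (PySem.Dict.insert PySem.Dict.empty 1 [1]) with hD
    have h2n : (2 : Int) ≤ 2 + (n : Int) := by omega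
    constructor
    · exact step_eq D (2 + (n : Int)) h2n hkeys
    · intro w
      rw [step_eq D (2 + (n : Int)) h2n hkeys]
      have := keys_step D (2 + (n : Int)) h2n
        ((pvWalkB (2 + (n : Int)) pvFuel (2 + (n : Int))).1 ++
          PySem.Dict.getD D (pvWalkB (2 + (n : Int)) pvFuel (2 + (n : Int))).2 []) hkeys w
      rw [this]
      omega

-- ===== VERDICT (by name: the statement is the Claim_ definition above) =====
theorem collatzSet_spec : Claim_equal_collatzSet := by
  intro u _
  unfold Spec_collatzSet collatzSet collatzSet_alt
  by_cases hu : u ≤ 2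
  · rw [PySem.List.pyRange_one_eq_nil hu]
    rfl
  · have hn : u = 2 + ((u - 2).toNat : Int) := by omega
    rw [hn]
    exact congrArg PySem.Dict.items (fold_eq (u - 2).toNat).1
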